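-- pv_equiv track=rewrite | github.com/polirritmico/codesignal_solutions | Python/alphanumericLess.py | tokens_generator
-- ===== SOURCE A (Python) =====
-- def tokens_generator(string):
--     number = ""
--     for char in string:
--         if char.isdigit():
--             number += char
--         elif number != "":
--             yield number
--             yield char
--             number = ""
--         else:
--             yield char
--     if number != "":
--         yield number
--     yield None
-- ===== SOURCE B (Python) =====
-- from itertools import groupby
--
-- def tokens_generator(string):
--     for is_num, group in groupby(string, key=str.isdigit):
--         if is_num:
--             yield "".join(group)
--         else:
--             yield from group
--     yield None
-- ===== Notes on version B (the rewrite author's own statement) =====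
-- stated objective: idiomatic
-- what changed: Replaces A's running digit-accumulator state machine with itertools.groupby(string, key=str.isdigit): digit runs are joined into one token, non-digit runs exploded per character, then None.
import Mathlib
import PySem

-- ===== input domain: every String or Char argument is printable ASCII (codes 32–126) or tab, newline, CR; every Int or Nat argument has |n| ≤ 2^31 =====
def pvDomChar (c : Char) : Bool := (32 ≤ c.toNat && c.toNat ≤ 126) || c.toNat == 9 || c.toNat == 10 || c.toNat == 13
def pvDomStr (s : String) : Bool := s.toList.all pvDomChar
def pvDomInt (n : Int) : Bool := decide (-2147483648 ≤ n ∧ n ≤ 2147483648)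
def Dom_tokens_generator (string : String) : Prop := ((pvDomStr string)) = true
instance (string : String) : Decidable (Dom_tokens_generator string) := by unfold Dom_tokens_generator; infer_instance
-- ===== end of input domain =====

-- B replaces A's running "number" accumulator with an itertools.groupby decomposition
-- (group runs by isdigit, join digit runs, explode non-digit runs); objective: idiomatic.

-- ===== PORT A =====
-- A's loop: state = pending digit run `number`, list of yielded tokens `acc`.
def tokensA_loop : List Char → List Char → List (Option String) → List (Option String)
  | [], number, acc =>
      (if number ≠ [] then acc ++ [some (String.mk number)] else acc) ++ [none]
  | c :: rest, number, acc =>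
      if PySem.Chars.isdigit c then
        tokensA_loop rest (number ++ [c]) acc
      else if number ≠ [] then
        tokensA_loop rest [] (acc ++ [some (String.mk number), some c.toString])
      else
        tokensA_loop rest number (acc ++ [some c.toString])

def tokens_generator (string : String) : List (Option String) :=
  tokensA_loop string.toList [] []

-- ===== PORT B =====
-- itertools.groupby(string, key=str.isdigit): maximal runs tagged with their key.
def pyGroupby : List Char → List (Bool × List Char)
  | [] => []
  | c :: rest =>
      match pyGroupby rest with
      | (b, g) :: gs =>
          if PySem.Chars.isdigit c = b then (b, c :: g) :: gs
          else (PySem.Chars.isdigit c, [c]) :: (b, g) :: gs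
      | [] => [(PySem.Chars.isdigit c, [c])]

def tokens_generator_alt (string : String) : List (Option String) :=
  ((pyGroupby string.toList).flatMap fun g =>
      if g.1 then [some (String.mk g.2)] else g.2.map (fun c => some c.toString))
    ++ [none]

-- ===== PRECONDITION & SPEC =====
def Spec_tokens_generator (string : String) (out : List (Option String)) : Prop := out = tokens_generator_alt string
instance (string : String) (out : List (Option String)) : Decidable (Spec_tokens_generator string out) := by unfold Spec_tokens_generator; infer_instance

-- ===== CLAIM (what is proved, stated in full; the proofs are below) =====
def Claim_equal_tokens_generator : Prop := ∀ (string : String), Dom_tokens_generator string → Spec_tokens_generator string (tokens_generator string)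

-- ===== LEMMAS AND PROOFS =====

-- flatten B's groups
def pvFlat (gs : List (Bool × List Char)) : List (Option String) :=
  gs.flatMap fun g => if g.1 then [some (String.mk g.2)] else g.2.map (fun c => some c.toString)

-- A's remaining output given pending run `number` and the groups of the rest
def pvEmit (number : List Char) (gs : List (Bool × List Char)) : List (Option String) :=
  match gs with
  | (true, g) :: rest => some (String.mk (number ++ g)) :: (pvFlat rest ++ [none])
  | gs => (if number ≠ [] then [some (String.mk number)] else []) ++ pvFlat gs ++ [none]

theorem pvEmit_nil (gs : List (Bool × List Char)) : pvEmit [] gs = pvFlat gs ++ [none] := by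
  match gs with
  | (true, g) :: rest => simp [pvEmit, pvFlat]
  | (false, g) :: rest => simp [pvEmit]
  | [] => simp [pvEmit]

theorem pvFlat_cons_nondigit (c : Char) (rest : List Char)
    (h : PySem.Chars.isdigit c = false) :
    pvFlat (pyGroupby (c :: rest)) = some c.toString :: pvFlat (pyGroupby rest) := by
  match hg : pyGroupby rest with
  | (true, g) :: gs => simp [pyGroupby, hg, h, pvFlat]
  | (false, g) :: gs => simp [pyGroupby, hg, h, pvFlat]
  | [] => simp [pyGroupby, hg, h, pvFlat]

theorem tokensA_loop_emit (cs : List Char) :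
    ∀ (number : List Char) (acc : List (Option String)),
      tokensA_loop cs number acc = acc ++ pvEmit number (pyGroupby cs) := by
  induction cs with
  | nil =>
      intro number acc
      by_cases h : number = [] <;> simp [tokensA_loop, pyGroupby, pvEmit, pvFlat, h]
  | cons c rest ih =>
      intro number acc
      by_cases hd : PySem.Chars.isdigit c = true
      · rw [show tokensA_loop (c :: rest) number acc
              = tokensA_loop rest (number ++ [c]) acc by simp [tokensA_loop, hd]]
        rw [ih]
        congr 1
        match hg : pyGroupby rest with
        | (true, g) :: gs => simp [pyGroupby, hg, hd, pvEmit]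
        | (false, g) :: gs => simp [pyGroupby, hg, hd, pvEmit]
        | [] => simp [pyGroupby, hg, hd, pvEmit]
      · rw [Bool.not_eq_true] at hd
        by_cases hn : number = []
        · rw [show tokensA_loop (c :: rest) number acc
                = tokensA_loop rest number (acc ++ [some c.toString]) by
              simp [tokensA_loop, hd, hn]]
          rw [ih, hn, pvEmit_nil, pvEmit_nil, pvFlat_cons_nondigit c rest hd]
          simp
        · rw [show tokensA_loop (c :: rest) number acc
                = tokensA_loop rest [] (acc ++ [some (String.mk number), some c.toString]) by
              simp [tokensA_loop, hd, hn]]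
          rw [ih, pvEmit_nil]
          match hg : pyGroupby rest with
          | (true, g) :: gs => simp [pyGroupby, hg, hd, pvEmit, hn, pvFlat]
          | (false, g) :: gs => simp [pyGroupby, hg, hd, pvEmit, hn, pvFlat]
          | [] => simp [pyGroupby, hg, hd, pvEmit, hn, pvFlat]

-- ===== VERDICT (by name: the statement is the Claim_ definition above) =====
theorem tokens_generator_spec : Claim_equal_tokens_generator := by
  intro s _
  show tokens_generator s = tokens_generator_alt s
  rw [tokens_generator, tokensA_loop_emit, pvEmit_nil]
  simp [tokens_generator_alt, pvFlat]
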